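-- pv_equiv track=rewrite | github.com/billandro/Python_practice_test | Assessment /Part1.py | character_frequency_per_word
-- ===== SOURCE A (Python) =====
-- def character_frequency_per_word(sentence):
--     """Return a dictionary of character frequencies for each word in a sentence"""
--     dict = {}
--     my_list = sentence.split(" ")
--
--     for i in range(len(my_list)):
--         if my_list[i] not in dict:
--             dict[my_list[i]] = {}
--
--     for key, value in dict.items():
--         for letter in key:
--             if letter not in value:
--                 dict[key][letter] = 1
--             else:
--                 dict[key][letter] += 1
--
--     return dict
-- ===== SOURCE B (Python) =====
-- def character_frequency_per_word(sentence):
--     """Return a dictionary of character frequencies for each word in a sentence"""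
--     return {w: {c: sum(1 if x == c else 0 for x in w) for c in dict.fromkeys(w)}
--             for w in dict.fromkeys(sentence.split(" "))}
-- ===== Notes on version B (the rewrite author's own statement) =====
-- stated objective: alternative
-- what changed: A mutates a dict in two phases (index the words with empty inner dicts, then fill each counter by incrementing per letter with membership tests); B is a pure nested comprehension: it dedupes the words once with dict.fromkeys, and for each word dedupes its characters and computes each character's frequency directly as a whole-word 0/1 sum, with no mutation and no incremental counters.
import Mathlib
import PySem

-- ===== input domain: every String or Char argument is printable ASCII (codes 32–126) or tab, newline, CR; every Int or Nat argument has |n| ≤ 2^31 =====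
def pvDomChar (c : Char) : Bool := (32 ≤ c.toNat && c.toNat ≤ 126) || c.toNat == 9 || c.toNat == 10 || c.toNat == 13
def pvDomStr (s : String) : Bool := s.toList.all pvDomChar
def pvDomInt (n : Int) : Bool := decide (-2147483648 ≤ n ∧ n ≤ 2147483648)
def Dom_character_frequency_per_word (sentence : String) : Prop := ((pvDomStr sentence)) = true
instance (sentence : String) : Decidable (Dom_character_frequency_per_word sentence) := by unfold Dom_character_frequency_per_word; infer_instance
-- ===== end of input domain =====

-- B replaces A's two-phase mutate-a-dict counting (index words with empty dicts, then
-- increment per letter) by a pure nested comprehension over the deduped words: each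
-- character's frequency is computed directly as a whole-word 0/1 sum (objective: alternative).


-- ===== PORT A =====
-- phase 2's inner loop: for letter in key: if letter not in value: value[letter] = 1 else: value[letter] += 1
def cfpwFill (key : List Char) (value : PySem.Dict String Int) : PySem.Dict String Int :=
  key.foldl (fun v c =>
    let s := String.ofList [c]
    match v.get? s with
    | none => v.insert s 1
    | some n => v.insert s (n + 1)) value

def character_frequency_per_word (sentence : String) : List (String × List (String × Int)) :=
  -- my_list = sentence.split(" "); sep " " is non-empty so split? is always `some`
  let myList := (PySem.Str.split? sentence " ").getD []
  -- for i in range(len(my_list)): if my_list[i] not in dict: dict[my_list[i]] = {}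
  let d1 := myList.foldl
    (fun d w => if d.contains w then d else d.insert w (PySem.Dict.empty : PySem.Dict String Int))
    PySem.Dict.empty
  -- for key, value in dict.items(): … (each key's inner dict is updated in place)
  let d2 := d1.items.foldl (fun d kv => d.insert kv.1 (cfpwFill kv.1.toList kv.2)) d1
  d2.items.map (fun kv => (kv.1, kv.2.items))

-- ===== PORT B =====
def character_frequency_per_word_alt (sentence : String) : List (String × List (String × Int)) :=
  -- {w: {c: sum(1 if x == c else 0 for x in w) for c in dict.fromkeys(w)}
  --  for w in dict.fromkeys(sentence.split(" "))}
  -- dict.fromkeys = the distinct elements in first-occurrence order = PySem.Set.ofList;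
  -- the comprehensions run over already-distinct keys, so each is a plain map.
  (PySem.Set.ofList ((PySem.Str.split? sentence " ").getD [])).map
    (fun w => (w, (PySem.Set.ofList w.toList).map
      (fun c => (String.ofList [c],
        (w.toList.map (fun x => if x == c then (1 : Int) else 0)).sum))))

-- ===== PRECONDITION & SPEC =====
def Spec_character_frequency_per_word (sentence : String) (out : List (String × List (String × Int))) : Prop := out = character_frequency_per_word_alt sentence
instance (sentence : String) (out : List (String × List (String × Int))) : Decidable (Spec_character_frequency_per_word sentence out) := by unfold Spec_character_frequency_per_word; infer_instance

-- ===== CLAIM (what is proved, stated in full; the proofs are below) =====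
def Claim_equal_character_frequency_per_word : Prop := ∀ (sentence : String), Dom_character_frequency_per_word sentence → Spec_character_frequency_per_word sentence (character_frequency_per_word sentence)

-- ===== LEMMAS AND PROOFS =====

-- A's inner counting loop, started from the empty dict, is the insert-spelled counter
-- over the single-char strings of the word.
def cfpwSingle (c : Char) : String := String.ofList [c]

theorem cfpwSingle_injective : Function.Injective cfpwSingle := by
  intro a b h
  have : (cfpwSingle a).toList = (cfpwSingle b).toList := by rw [h]
  simpa [cfpwSingle] using this

theorem cfpwFill_eq_counter (w : String) :
    cfpwFill w.toList PySem.Dict.empty = PySem.Dict.counter (w.toList.map cfpwSingle) := by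
  rw [← PySem.Dict.foldl_insert_getD_add_one_eq_counter, List.foldl_map]
  unfold cfpwFill cfpwSingle
  congr 1
  funext v c
  simp only
  rw [PySem.Dict.getD_eq_get?_getD]
  cases h : v.get? (String.ofList [c]) <;> simp

-- the key order both sides realize: ordered dedup, A's via membership tests on keys,
-- B's via PySem.Set.ofList
def cfpwDedup (K : List String) (ws : List String) : List String :=
  ws.foldl (fun ks w => if w ∈ ks then ks else ks ++ [w]) K

theorem cfpwDedup_cons (K : List String) (w : String) (ws : List String) :
    cfpwDedup K (w :: ws) = cfpwDedup (if w ∈ K then K else K ++ [w]) ws := rfl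

theorem cfpwDedup_eq_ofList (ws : List String) :
    cfpwDedup [] ws = PySem.Set.ofList ws := by
  unfold cfpwDedup PySem.Set.ofList
  congr 1
  funext ks w
  simp [PySem.Set.add, PySem.Set.contains]

theorem mem_cfpwDedup (K ws : List String) (k : String) :
    k ∈ cfpwDedup K ws ↔ k ∈ K ∨ k ∈ ws := by
  induction ws generalizing K with
  | nil => simp [cfpwDedup]
  | cons w ws ih =>
    rw [cfpwDedup_cons, ih]
    by_cases hw : w ∈ K
    · rw [if_pos hw]
      simp only [List.mem_cons]
      constructor
      · tauto
      · rintro (h | rfl | h) <;> tauto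
    · rw [if_neg hw]
      simp only [List.mem_append, List.mem_cons]
      tauto

theorem nodup_cfpwDedup (K ws : List String) (h : K.Nodup) : (cfpwDedup K ws).Nodup := by
  induction ws generalizing K with
  | nil => exact h
  | cons w ws ih =>
    rw [cfpwDedup_cons]
    by_cases hw : w ∈ K
    · rw [if_pos hw]; exact ih K h
    · rw [if_neg hw]
      refine ih _ ?_
      rw [List.nodup_append]
      refine ⟨h, List.nodup_singleton w, ?_⟩
      intro a ha b hb
      simp only [List.mem_singleton] at hb
      subst hb
      exact fun hab => hw (hab ▸ ha)

-- Set.ofList commutes with an injective map (first-occurrence order is preserved).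
theorem ofList_map_of_injective {α β : Type} [BEq α] [LawfulBEq α] [BEq β] [LawfulBEq β]
    (f : α → β) (hf : Function.Injective f) (l : List α) (acc : List α) :
    (l.map f).foldl PySem.Set.add (acc.map f) = ((l.foldl PySem.Set.add acc).map f) := by
  induction l generalizing acc with
  | nil => rfl
  | cons x l ih =>
    simp only [List.map_cons, List.foldl_cons]
    have hmem : (PySem.Set.add (acc.map f) (f x)) =
        (PySem.Set.add acc x).map f := by
      simp only [PySem.Set.add, PySem.Set.contains, List.contains_eq_mem, List.mem_map]
      by_cases hx : x ∈ acc
      · rw [if_pos (by simp; exact ⟨x, hx, rfl⟩), if_pos (by simpa using hx)]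
      · have : ¬ ∃ a ∈ acc, f a = f x := by
          rintro ⟨a, ha, hfa⟩; exact hx (hf hfa ▸ ha)
        simp only [decide_eq_true_eq]
        rw [if_neg (by simpa using this), if_neg hx, List.map_append]
        rfl
    rw [hmem, ih]

theorem setOfList_map {α β : Type} [BEq α] [LawfulBEq α] [BEq β] [LawfulBEq β]
    (f : α → β) (hf : Function.Injective f) (l : List α) :
    PySem.Set.ofList (l.map f) = (PySem.Set.ofList l).map f := by
  unfold PySem.Set.ofList
  exact ofList_map_of_injective f hf l []

-- Lookup and keys after A's first phase (insert an empty dict only for unseen words).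
theorem get?_foldl_phase1 (ws : List String)
    (d : PySem.Dict String (PySem.Dict String Int)) (k : String) :
    (ws.foldl (fun d w => if d.contains w then d
                          else d.insert w (PySem.Dict.empty : PySem.Dict String Int)) d).get? k =
      if (d.get? k).isSome ∨ k ∈ ws then some ((d.get? k).getD PySem.Dict.empty) else none := by
  induction ws generalizing d with
  | nil =>
    cases hk : d.get? k <;> simp [hk]
  | cons w ws ih =>
    simp only [List.foldl_cons]
    by_cases hc : d.contains w
    · rw [if_pos hc, ih]
      by_cases hw : k = w
      · subst hw
        rw [PySem.Dict.contains_eq_isSome_get?] at hc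
        simp [hc, List.mem_cons]
      · simp [List.mem_cons, hw]
    · rw [if_neg hc, ih]
      by_cases hw : k = w
      · subst hw
        rw [PySem.Dict.contains_eq_isSome_get?] at hc
        simp only [Bool.not_eq_true, Option.isSome_eq_false_iff, Option.isNone_iff_eq_none] at hc
        simp [PySem.Dict.get?_insert_self, hc, List.mem_cons]
      · simp [PySem.Dict.get?_insert_of_ne _ _ hw, List.mem_cons, hw]

theorem keys_foldl_phase1 (ws : List String)
    (d : PySem.Dict String (PySem.Dict String Int)) :
    (ws.foldl (fun d w => if d.contains w then d
                          else d.insert w (PySem.Dict.empty : PySem.Dict String Int)) d).keys =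
      cfpwDedup d.keys ws := by
  induction ws generalizing d with
  | nil => rfl
  | cons w ws ih =>
    rw [List.foldl_cons, cfpwDedup_cons]
    by_cases hw : w ∈ d.keys
    · rw [if_pos ((PySem.Dict.contains_iff_mem_keys d w).mpr hw), if_pos hw, ih]
    · have hc : d.contains w = false := by
        simp only [PySem.Dict.contains_eq_decide_mem_keys, decide_eq_false_iff_not]
        exact hw
      rw [if_neg (by simp [hc]), if_neg hw, ih,
        PySem.Dict.keys_insert_of_not_contains d _ hc]

-- Lookup after A's second phase: every key already present gets its character counter.
theorem get?_foldl_phase2 (l : List (String × PySem.Dict String Int))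
    (d : PySem.Dict String (PySem.Dict String Int)) (k : String)
    (hval : ∀ kv ∈ l, kv.2 = PySem.Dict.empty) :
    (l.foldl (fun d kv => d.insert kv.1 (cfpwFill kv.1.toList kv.2)) d).get? k =
      if k ∈ l.map (·.1) then some (cfpwFill k.toList PySem.Dict.empty) else d.get? k := by
  induction l generalizing d with
  | nil => simp
  | cons kv l ih =>
    simp only [List.foldl_cons, List.map_cons, List.mem_cons]
    rw [ih _ (fun x hx => hval x (List.mem_cons_of_mem _ hx))]
    have hv2 : kv.2 = (PySem.Dict.empty : PySem.Dict String Int) := hval kv (List.mem_cons_self ..)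
    by_cases hk : k ∈ l.map (·.1)
    · simp [hk]
    · by_cases hw : k = kv.1
      · subst hw
        simp [hk, hv2, PySem.Dict.get?_insert_self]
      · simp [hk, hw, PySem.Dict.get?_insert_of_ne _ _ hw]

theorem keys_foldl_phase2 (l : List (String × PySem.Dict String Int))
    (d : PySem.Dict String (PySem.Dict String Int)) (hmem : ∀ kv ∈ l, kv.1 ∈ d.keys) :
    (l.foldl (fun d kv => d.insert kv.1 (cfpwFill kv.1.toList kv.2)) d).keys = d.keys := by
  induction l generalizing d with
  | nil => rfl
  | cons kv l ih =>
    simp only [List.foldl_cons]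
    have h1 : kv.1 ∈ d.keys := hmem kv (List.mem_cons_self ..)
    have hc : (d.insert kv.1 (cfpwFill kv.1.toList kv.2)).keys = d.keys :=
      PySem.Dict.keys_insert_of_contains d _ ((PySem.Dict.contains_iff_mem_keys d kv.1).mpr h1)
    rw [ih _ (by intro x hx; rw [hc]; exact hmem x (List.mem_cons_of_mem _ hx)), hc]

-- A's inner dict, rendered as items, is B's inner comprehension.
theorem cfpwInner_eq (w : String) :
    (cfpwFill w.toList PySem.Dict.empty).items =
      (PySem.Set.ofList w.toList).map
        (fun c => (cfpwSingle c,
          (w.toList.map (fun x => if x == c then (1 : Int) else 0)).sum)) := by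
  rw [cfpwFill_eq_counter, PySem.Dict.items_counter,
    setOfList_map cfpwSingle cfpwSingle_injective, List.map_map]
  apply List.map_congr_left
  intro c _
  simp only [Function.comp]
  rw [List.count_map_of_injective _ _ cfpwSingle_injective,
    PySem.List.sum_map_ite_one_zero (fun x => x == c) w.toList]
  simp [List.count]

theorem character_frequency_per_word_eq (sentence : String) :
    character_frequency_per_word sentence = character_frequency_per_word_alt sentence := by
  unfold character_frequency_per_word character_frequency_per_word_alt
  set ws := (PySem.Str.split? sentence " ").getD [] with hws
  simp only
  set d1 := ws.foldl
    (fun d w => if d.contains w then d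
                else d.insert w (PySem.Dict.empty : PySem.Dict String Int))
    PySem.Dict.empty with hd1
  set d2 := d1.items.foldl (fun d kv => d.insert kv.1 (cfpwFill kv.1.toList kv.2)) d1 with hd2
  -- d1: lookups and keys
  have hget1 : ∀ k, d1.get? k = if k ∈ ws then some PySem.Dict.empty else none := by
    intro k
    rw [hd1, get?_foldl_phase1]
    simp [PySem.Dict.get?_empty]
  have hkeys1 : d1.keys = cfpwDedup [] ws := by
    rw [hd1, keys_foldl_phase1]; rfl
  have hnd1 : d1.keys.Nodup := by rw [hkeys1]; exact nodup_cfpwDedup [] ws List.nodup_nil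
  have hmemkeys1 : ∀ k, k ∈ d1.keys ↔ k ∈ ws := by
    intro k; rw [hkeys1, mem_cfpwDedup]; simp
  have hval1 : ∀ kv ∈ d1.items, kv.2 = (PySem.Dict.empty : PySem.Dict String Int) := by
    rintro ⟨a, b⟩ hkv
    have h := PySem.Dict.get?_of_mem_items d1 hkv hnd1
    rw [hget1 a] at h
    by_cases hm : a ∈ ws
    · rw [if_pos hm] at h; exact (Option.some_inj.mp h).symm
    · rw [if_neg hm] at h; exact absurd h (by simp)
  -- d2: lookups and keys
  have hmapfst : (d1.items.map (·.1) : List String) = d1.keys := rfl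
  have hget2 : ∀ k, d2.get? k =
      if k ∈ ws then some (cfpwFill k.toList PySem.Dict.empty) else none := by
    intro k
    rw [hd2, get?_foldl_phase2 _ _ _ hval1, hget1 k, hmapfst]
    by_cases hm : k ∈ ws
    · rw [if_pos ((hmemkeys1 k).mpr hm), if_pos hm]
    · have hk1 : k ∉ d1.keys := fun h => hm ((hmemkeys1 k).mp h)
      simp [hm, hk1]
  have hkeys2 : d2.keys = d1.keys := by
    rw [hd2]
    exact keys_foldl_phase2 _ _ (fun kv hkv => PySem.Dict.mem_keys_of_mem_items d1 hkv)
  have hnd2 : d2.keys.Nodup := hkeys2 ▸ hnd1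
  -- A's result = map over the deduped words of the inner counters
  rw [PySem.Dict.items_eq_map_keys d2 hnd2 PySem.Dict.empty, hkeys2, hkeys1,
    cfpwDedup_eq_ofList, List.map_map]
  apply List.map_congr_left
  intro w hw
  have hwws : w ∈ ws := by
    have := PySem.Set.mem_ofList (xs := ws) (y := w)
    tauto
  simp only [Function.comp]
  rw [PySem.Dict.getD_eq_get?_getD, hget2 w, if_pos hwws]
  simpa [cfpwSingle] using congrArg (Prod.mk w) (cfpwInner_eq w)

-- ===== VERDICT (by name: the statement is the Claim_ definition above) =====
theorem character_frequency_per_word_spec : Claim_equal_character_frequency_per_word := by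
  intro s _
  unfold Spec_character_frequency_per_word
  exact character_frequency_per_word_eq s
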